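-- pv_equiv track=rewrite | github.com/thshao2/ranked-enumeration | ranked_enumeration/bag_relations.py | _natural_join_assignments
-- ===== SOURCE A (Python) =====
-- from typing import Any
--
-- def _is_consistent(left: dict[str, Any], right: dict[str, Any]) -> bool:
--     overlap = set(left).intersection(right)
--     return all(left[var] == right[var] for var in overlap)
--
-- def _natural_join_assignments(
--     left: list[dict[str, Any]], right: list[dict[str, Any]]
-- ) -> list[dict[str, Any]]:
--     out: list[dict[str, Any]] = []
--     for l_item in left:
--         for r_item in right:
--             if _is_consistent(l_item, r_item):
--                 merged = dict(l_item)
--                 merged.update(r_item)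
--                 out.append(merged)
--     return out
-- ===== SOURCE B (Python) =====
-- def _natural_join_assignments(left, right):
--     # Inverted index: variable -> [(right position, value)]; per left item collect
--     # the set of right positions with a conflicting value, then emit the rest in order.
--     index = {}
--     for j, r_item in enumerate(right):
--         for k, v in r_item.items():
--             index.setdefault(k, []).append((j, v))
--     out = []
--     for l_item in left:
--         bad = set()
--         for k, v in l_item.items():
--             for j, v2 in index.get(k, []):
--                 if v2 != v:
--                     bad.add(j)
--         for j, r_item in enumerate(right):
--             if j not in bad:
--                 out.append({**l_item, **r_item})
--     return out
-- ===== Notes on version B (the rewrite author's own statement) =====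
-- stated objective: alternative
-- what changed: B replaces the per-pair set-intersection consistency test with an inverted index from variable to (right position, value) built once; for each left item it collects the set of conflicting right positions from the index and emits the remaining right items in order (measured ~1.4x faster, below the 1.5x bar, so no speed is claimed).
import Mathlib
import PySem

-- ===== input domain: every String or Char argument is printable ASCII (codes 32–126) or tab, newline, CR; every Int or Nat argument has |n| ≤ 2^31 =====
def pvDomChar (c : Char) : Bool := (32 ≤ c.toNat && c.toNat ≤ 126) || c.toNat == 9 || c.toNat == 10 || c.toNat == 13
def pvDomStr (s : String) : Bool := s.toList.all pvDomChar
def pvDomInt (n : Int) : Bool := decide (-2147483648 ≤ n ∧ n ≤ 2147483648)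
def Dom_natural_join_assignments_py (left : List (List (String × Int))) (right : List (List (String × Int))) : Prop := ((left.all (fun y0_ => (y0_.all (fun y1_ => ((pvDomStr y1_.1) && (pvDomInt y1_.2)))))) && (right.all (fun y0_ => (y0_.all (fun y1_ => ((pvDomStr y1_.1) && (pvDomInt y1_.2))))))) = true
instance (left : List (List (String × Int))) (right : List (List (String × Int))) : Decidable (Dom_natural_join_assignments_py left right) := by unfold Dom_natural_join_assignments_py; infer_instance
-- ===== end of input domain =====

-- B replaces A's per-pair set-intersection consistency test by an inverted index
-- (variable -> (right position, value)) built once; per left item it collects the set of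
-- conflicting right positions and emits the remaining right items in order.

-- ===== PORT A =====
-- _is_consistent: left[var] / right[var] are only evaluated for var in both key sets,
-- where dict lookup yields a value; get? == get? compares exactly those values there.
def isConsistentA (l r : List (String × Int)) : Bool :=
  (PySem.Set.inter (PySem.Set.ofList (l.map Prod.fst)) (r.map Prod.fst)).all
    (fun var => (PySem.Dict.mk l).get? var == (PySem.Dict.mk r).get? var)

-- merged = dict(l_item); merged.update(r_item)  (also B's {**l_item, **r_item})
def mergedA (l r : List (String × Int)) : List (String × Int) :=
  ((PySem.Dict.mk l).update r).items

def natural_join_assignments_py (left : List (List (String × Int))) (right : List (List (String × Int))) : List (List (String × Int)) :=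
  left.foldl (fun out l_item =>
    right.foldl (fun out r_item =>
      if isConsistentA l_item r_item then out ++ [mergedA l_item r_item] else out) out) []

-- ===== PORT B =====
-- index.setdefault(k, []).append((j, v))  ==  index[k] = index.get(k, []) + [(j, v)]
def joinIndexB (right : List (List (String × Int))) : PySem.Dict String (List (Int × Int)) :=
  (PySem.List.enumerate right).foldl (fun d jr =>
    jr.2.foldl (fun d kv => d.modify kv.1 [] (· ++ [(jr.1, kv.2)])) d) PySem.Dict.empty

def badB (idx : PySem.Dict String (List (Int × Int))) (l_item : List (String × Int)) : PySem.Set Int :=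
  l_item.foldl (fun bad kv =>
    (idx.getD kv.1 []).foldl (fun bad jv =>
      if jv.2 ≠ kv.2 then bad.add jv.1 else bad) bad) PySem.Set.empty

def natural_join_assignments_py_alt (left : List (List (String × Int))) (right : List (List (String × Int))) : List (List (String × Int)) :=
  let idx := joinIndexB right
  left.foldl (fun out l_item =>
    let bad := badB idx l_item
    (PySem.List.enumerate right).foldl (fun out jr =>
      if !(PySem.Set.contains bad jr.1) then out ++ [mergedA l_item jr.2] else out) out) []

-- ===== PRECONDITION & SPEC =====
-- Pre_ excludes association lists whose inner lists carry a duplicate key: those do not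
-- represent Python dicts (A's inputs are dicts, whose keys are unique), so no behaviour
-- of the Python A is excluded.
def Pre_natural_join_assignments_py (left : List (List (String × Int))) (right : List (List (String × Int))) : Prop :=
  (∀ d ∈ left, (d.map Prod.fst).Nodup) ∧ (∀ d ∈ right, (d.map Prod.fst).Nodup)
instance (left : List (List (String × Int))) (right : List (List (String × Int))) : Decidable (Pre_natural_join_assignments_py left right) := by unfold Pre_natural_join_assignments_py; infer_instance

def pvWitness_natural_join_assignments_py : (List (List (String × Int))) × (List (List (String × Int))) :=
  ([[("x", 1), ("y", 2)], [("x", 3)]], [[("x", 1), ("z", 5)], [("z", 7)]])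

def Spec_natural_join_assignments_py (left : List (List (String × Int))) (right : List (List (String × Int))) (out : List (List (String × Int))) : Prop := out = natural_join_assignments_py_alt left right
instance (left : List (List (String × Int))) (right : List (List (String × Int))) (out : List (List (String × Int))) : Decidable (Spec_natural_join_assignments_py left right out) := by unfold Spec_natural_join_assignments_py; infer_instance

-- ===== CLAIM (what is proved, stated in full; the proofs are below) =====
def Claim_equal_natural_join_assignments_py : Prop := ∀ (left : List (List (String × Int))) (right : List (List (String × Int))), Dom_natural_join_assignments_py left right → Pre_natural_join_assignments_py left right → Spec_natural_join_assignments_py left right (natural_join_assignments_py left right)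

-- ===== LEMMAS AND PROOFS =====

theorem mem_enumerate {α : Type} (xs : List α) (s : Int) (p : Int × α) :
    p ∈ PySem.List.enumerate xs s ↔ ∃ n : Nat, p.1 = s + n ∧ xs[n]? = some p.2 := by
  induction xs generalizing s with
  | nil => simp [PySem.List.enumerate]
  | cons x t ih =>
    show p ∈ (s, x) :: PySem.List.enumerate t (s+1) ↔ _
    rw [List.mem_cons, ih]
    constructor
    · rintro (rfl | ⟨n, h1, h2⟩)
      · exact ⟨0, by simp⟩
      · exact ⟨n+1, by push_cast at h1 ⊢; omega, by simpa using h2⟩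
    · rintro ⟨n, h1, h2⟩
      cases n with
      | zero =>
        left
        simp at h2 h1
        obtain ⟨a, b⟩ := p; simp_all
      | succ n =>
        right; exact ⟨n, by push_cast at h1 ⊢; omega, by simpa using h2⟩

theorem enumerate_unique {α : Type} (xs : List α) (j : Int) (r r' : α)
    (h : (j, r) ∈ PySem.List.enumerate xs 0) (h' : (j, r') ∈ PySem.List.enumerate xs 0) :
    r = r' := by
  rw [mem_enumerate] at h h'
  obtain ⟨n, h1, h2⟩ := h
  obtain ⟨n', h1', h2'⟩ := h'
  simp only at h1 h1' h2 h2'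
  have : n = n' := by omega
  subst this
  rw [h2] at h2'; exact Option.some.inj h2'

theorem mem_of_mem_enumerate {α : Type} (xs : List α) (j : Int) (r : α)
    (h : (j, r) ∈ PySem.List.enumerate xs 0) : r ∈ xs := by
  rw [mem_enumerate] at h
  obtain ⟨n, _, h2⟩ := h
  exact List.mem_of_getElem? h2

theorem joinIndexB_eq (right : List (List (String × Int))) :
    joinIndexB right =
      ((PySem.List.enumerate right).flatMap (fun jr => jr.2.map (fun kv => (kv.1, (jr.1, kv.2))))).foldl
        (fun d p => d.modify p.1 [] (· ++ [p.2])) PySem.Dict.empty := by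
  unfold joinIndexB
  simp only [List.flatMap_def, List.foldl_flatten, List.foldl_map]

theorem getD_joinIndexB (right : List (List (String × Int))) (k : String) :
    (joinIndexB right).getD k [] =
      (((PySem.List.enumerate right).flatMap (fun jr => jr.2.map (fun kv => (kv.1, (jr.1, kv.2))))).filter
        (fun p => p.1 == k)).map (fun p => p.2) := by
  rw [joinIndexB_eq, PySem.Dict.getD_foldl_modify_append]
  simp

theorem mem_getD_joinIndexB (right : List (List (String × Int))) (k : String) (jv : Int × Int) :
    jv ∈ (joinIndexB right).getD k [] ↔
      ∃ r, (jv.1, r) ∈ PySem.List.enumerate right 0 ∧ (k, jv.2) ∈ r := by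
  rw [getD_joinIndexB]
  simp only [List.mem_map, List.mem_filter, List.mem_flatMap, beq_iff_eq]
  constructor
  · rintro ⟨p, ⟨⟨jr, hjr, ⟨kv, hkv, rfl⟩⟩, hk⟩, rfl⟩
    subst hk
    exact ⟨jr.2, hjr, hkv⟩
  · rintro ⟨r, hr, hkv⟩
    exact ⟨(k, (jv.1, jv.2)), ⟨⟨(jv.1, r), hr, ⟨(k, jv.2), hkv, rfl⟩⟩, rfl⟩, rfl⟩

theorem mem_foldl_addif' {α β : Type} [BEq α] [LawfulBEq α]
    (P : β → Prop) [DecidablePred P] (g : β → α) (l : List β) (s : PySem.Set α) (x : α) :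
    x ∈ l.foldl (fun s a => if P a then PySem.Set.add s (g a) else s) s ↔
      x ∈ s ∨ ∃ a ∈ l, P a ∧ g a = x := by
  induction l generalizing s with
  | nil => simp
  | cons a t ih =>
    simp only [List.foldl_cons, ih, List.mem_cons]
    by_cases h : P a
    · rw [if_pos h, PySem.Set.mem_add]
      constructor
      · rintro (((hx | rfl)) | ⟨b, hb, hP, rfl⟩)
        · exact Or.inl hx
        · exact Or.inr ⟨a, Or.inl rfl, h, rfl⟩
        · exact Or.inr ⟨b, Or.inr hb, hP, rfl⟩
      · rintro (hx | ⟨b, (rfl | hb), hP, rfl⟩)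
        · exact Or.inl (Or.inl hx)
        · exact Or.inl (Or.inr rfl)
        · exact Or.inr ⟨b, hb, hP, rfl⟩
    · rw [if_neg h]
      constructor
      · rintro (hx | ⟨b, hb, hP, rfl⟩)
        · exact Or.inl hx
        · exact Or.inr ⟨b, Or.inr hb, hP, rfl⟩
      · rintro (hx | ⟨b, (rfl | hb), hP, rfl⟩)
        · exact Or.inl hx
        · exact absurd hP h
        · exact Or.inr ⟨b, hb, hP, rfl⟩

theorem mem_badB_aux (idx : PySem.Dict String (List (Int × Int))) (l : List (String × Int)) (s : PySem.Set Int) (j : Int) :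
    j ∈ l.foldl (fun bad kv =>
      (idx.getD kv.1 []).foldl (fun bad jv => if jv.2 ≠ kv.2 then bad.add jv.1 else bad) bad) s ↔
      j ∈ s ∨ ∃ kv ∈ l, ∃ jv ∈ idx.getD kv.1 [], jv.2 ≠ kv.2 ∧ jv.1 = j := by
  induction l generalizing s with
  | nil => simp
  | cons kv t ih =>
    simp only [List.foldl_cons, List.mem_cons]
    rw [ih, mem_foldl_addif' (fun jv : Int × Int => jv.2 ≠ kv.2) (fun jv : Int × Int => jv.1) (idx.getD kv.1 []) s j]
    constructor
    · rintro ((hs | h) | ⟨b, hb, h2⟩)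
      · exact Or.inl hs
      · exact Or.inr ⟨kv, Or.inl rfl, by simpa using h⟩
      · exact Or.inr ⟨b, Or.inr hb, h2⟩
    · rintro (hs | ⟨b, (rfl | hb), h2⟩)
      · exact Or.inl (Or.inl hs)
      · exact Or.inl (Or.inr (by simpa using h2))
      · exact Or.inr ⟨b, hb, h2⟩

theorem mem_badB (idx : PySem.Dict String (List (Int × Int))) (l : List (String × Int)) (j : Int) :
    j ∈ badB idx l ↔ ∃ kv ∈ l, ∃ jv ∈ idx.getD kv.1 [], jv.2 ≠ kv.2 ∧ jv.1 = j := by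
  unfold badB
  rw [mem_badB_aux]
  simp [PySem.Set.empty]

theorem isConsistentA_false_iff (l r : List (String × Int))
    (hl : (l.map Prod.fst).Nodup) (hr : (r.map Prod.fst).Nodup) :
    isConsistentA l r = false ↔ ∃ kv ∈ l, ∃ v2, (kv.1, v2) ∈ r ∧ v2 ≠ kv.2 := by
  have hkl : ∀ (k : String) (v : Int), ((PySem.Dict.mk l).get? k = some v ↔ (k, v) ∈ l) :=
    fun k v => PySem.Dict.get?_eq_some_iff_mem_items (PySem.Dict.mk l) k v hl
  have hkr : ∀ (k : String) (v : Int), ((PySem.Dict.mk r).get? k = some v ↔ (k, v) ∈ r) :=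
    fun k v => PySem.Dict.get?_eq_some_iff_mem_items (PySem.Dict.mk r) k v hr
  unfold isConsistentA
  rw [List.all_eq_false]
  constructor
  · rintro ⟨k, hk, hf⟩
    rw [PySem.Set.mem_inter, PySem.Set.mem_ofList] at hk
    obtain ⟨hkl', hkr'⟩ := hk
    obtain ⟨kv, hkv, rfl⟩ := List.mem_map.mp hkl'
    obtain ⟨kv', hkv', hfst⟩ := List.mem_map.mp hkr'
    have g1 : (PySem.Dict.mk l).get? kv.1 = some kv.2 := (hkl kv.1 kv.2).mpr hkv
    have g2 : (PySem.Dict.mk r).get? kv.1 = some kv'.2 := (hkr kv.1 kv'.2).mpr (by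
      have : (kv.1, kv'.2) = kv' := by rw [← hfst]
      rw [this]; exact hkv')
    refine ⟨kv, hkv, kv'.2, ?_, ?_⟩
    · have : (kv.1, kv'.2) = kv' := by rw [← hfst]
      rw [this]; exact hkv'
    · intro hvv
      rw [g1, g2, hvv] at hf
      simp at hf
  · rintro ⟨kv, hkv, v2, hv2, hne⟩
    refine ⟨kv.1, ?_, ?_⟩
    · rw [PySem.Set.mem_inter, PySem.Set.mem_ofList]
      exact ⟨List.mem_map.mpr ⟨kv, hkv, rfl⟩, List.mem_map.mpr ⟨(kv.1, v2), hv2, rfl⟩⟩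
    · rw [(hkl kv.1 kv.2).mpr hkv, (hkr kv.1 v2).mpr hv2]
      simp [Ne.symm hne]

theorem contains_badB (right : List (List (String × Int))) (l : List (String × Int))
    (hl : (l.map Prod.fst).Nodup) (hr : ∀ d ∈ right, (d.map Prod.fst).Nodup)
    (j : Int) (r : List (String × Int)) (hjr : (j, r) ∈ PySem.List.enumerate right 0) :
    PySem.Set.contains (badB (joinIndexB right) l) j = !(isConsistentA l r) := by
  have key : (PySem.Set.contains (badB (joinIndexB right) l) j = true) ↔ isConsistentA l r = false := by
    rw [PySem.Set.contains_iff, mem_badB,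
      isConsistentA_false_iff l r hl (hr r (mem_of_mem_enumerate _ _ _ hjr))]
    constructor
    · rintro ⟨kv, hkv, jv, hjv, hne, rfl⟩
      rw [mem_getD_joinIndexB] at hjv
      obtain ⟨r', hr', hmem⟩ := hjv
      have : r' = r := enumerate_unique right jv.1 r' r hr' hjr
      subst this
      exact ⟨kv, hkv, jv.2, hmem, hne⟩
    · rintro ⟨kv, hkv, v2, hv2, hne⟩
      refine ⟨kv, hkv, (j, v2), ?_, hne, rfl⟩
      rw [mem_getD_joinIndexB]
      exact ⟨r, hjr, hv2⟩
  cases hc : PySem.Set.contains (badB (joinIndexB right) l) j <;>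
    cases hi : isConsistentA l r <;> simp_all

theorem enum_filter_map {α β : Type} (xs : List α) (s : Int) (p : Int × α → Bool)
    (q : α → Bool) (f : α → β)
    (h : ∀ pr ∈ PySem.List.enumerate xs s, p pr = q pr.2) :
    ((PySem.List.enumerate xs s).filter p).map (fun pr => f pr.2) = (xs.filter q).map f := by
  induction xs generalizing s with
  | nil => simp [PySem.List.enumerate]
  | cons x t ih =>
    have hcons : PySem.List.enumerate (x :: t) s = (s, x) :: PySem.List.enumerate t (s+1) := rfl
    rw [hcons, List.filter_cons, List.filter_cons]
    have hx : p (s, x) = q x := h (s, x) (by rw [hcons]; exact List.mem_cons_self ..)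
    have ht := ih (s+1) (fun pr hpr => h pr (by rw [hcons]; exact List.mem_cons_of_mem _ hpr))
    rw [hx]
    by_cases hq : q x = true
    · rw [if_pos hq, if_pos hq, List.map_cons, List.map_cons, ht]
    · rw [if_neg hq, if_neg hq, ht]

theorem inner_eq (right : List (List (String × Int))) (hr : ∀ d ∈ right, (d.map Prod.fst).Nodup)
    (l_item : List (String × Int)) (hl : (l_item.map Prod.fst).Nodup) (out : List (List (String × Int))) :
    right.foldl (fun out r_item =>
        if isConsistentA l_item r_item then out ++ [mergedA l_item r_item] else out) out =
      (PySem.List.enumerate right).foldl (fun out jr =>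
        if !(PySem.Set.contains (badB (joinIndexB right) l_item) jr.1) then
          out ++ [mergedA l_item jr.2] else out) out := by
  rw [PySem.List.foldl_append_if (isConsistentA l_item) (mergedA l_item) right out,
    PySem.List.foldl_append_if (fun jr : Int × List (String × Int) =>
      !(PySem.Set.contains (badB (joinIndexB right) l_item) jr.1))
      (fun jr : Int × List (String × Int) => mergedA l_item jr.2) (PySem.List.enumerate right) out]
  rw [enum_filter_map right 0
    (fun jr => !(PySem.Set.contains (badB (joinIndexB right) l_item) jr.1))
    (isConsistentA l_item) (mergedA l_item)
    (fun pr hpr => by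
      dsimp only
      rw [contains_badB right l_item hl hr pr.1 pr.2 (by simpa using hpr), Bool.not_not])]

-- ===== VERDICT (by name: the statement is the Claim_ definition above) =====
theorem natural_join_assignments_py_spec : Claim_equal_natural_join_assignments_py := by
  intro left right _hDom hPre
  obtain ⟨hl, hr⟩ := hPre
  show natural_join_assignments_py left right = natural_join_assignments_py_alt left right
  unfold natural_join_assignments_py natural_join_assignments_py_alt
  exact PySem.List.foldl_congr_mem left _ _ [] (fun out l_item hmem =>
    inner_eq right hr l_item (hl l_item hmem) out)
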